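-- pv_equiv track=rewrite | github.com/marceloarantes19/ia2024 | buscaLocal/Rainhas/rainhasHillClimbMC.py | rainhaComMaisAtaques
-- ===== SOURCE A (Python) =====
-- def rainhaComMaisAtaques(r):
-- 	na = [0 for i in range(0, len(r))]
-- 	for i in range(0, len(r)-1):
-- 		for j in range(i+1, len(r)):
-- 			if r[i]==r[j] or abs(i-j)==abs(r[i]-r[j]):
-- 				na[i] = na[i] + 1
-- 				na[j] = na[j] + 1
-- 	x = max(na)
-- 	return na.index(x)
-- ===== SOURCE B (Python) =====
-- def rainhaComMaisAtaques(r):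
--     rows = {}
--     diags = {}
--     antis = {}
--     for i, v in enumerate(r):
--         rows[v] = rows.get(v, 0) + 1
--         diags[v - i] = diags.get(v - i, 0) + 1
--         antis[v + i] = antis.get(v + i, 0) + 1
--     na = [rows[v] + diags[v - i] + antis[v + i] - 3 for i, v in enumerate(r)]
--     return na.index(max(na))
-- ===== Notes on version B (the rewrite author's own statement) =====
-- stated objective: faster
-- what changed: Replaces the O(n^2) pairwise double loop with three hash-map counters (row, diagonal, anti-diagonal) built in one pass, so each queen's attack count is three O(1) lookups; like A it returns the first index attaining the maximum (and, like A, raises ValueError on an empty board).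
import Mathlib
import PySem

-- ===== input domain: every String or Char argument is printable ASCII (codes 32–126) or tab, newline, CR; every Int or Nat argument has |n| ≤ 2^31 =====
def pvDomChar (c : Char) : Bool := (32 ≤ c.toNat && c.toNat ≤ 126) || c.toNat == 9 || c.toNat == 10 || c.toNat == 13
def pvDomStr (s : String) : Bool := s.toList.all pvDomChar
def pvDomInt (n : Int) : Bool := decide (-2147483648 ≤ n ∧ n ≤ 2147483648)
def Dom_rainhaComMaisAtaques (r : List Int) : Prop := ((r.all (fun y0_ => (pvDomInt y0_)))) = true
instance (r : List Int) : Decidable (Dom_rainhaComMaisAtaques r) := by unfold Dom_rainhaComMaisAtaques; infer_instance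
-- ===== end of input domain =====

-- B replaces A's O(n^2) pairwise double loop by three one-pass dict counters (row / diagonal / anti-diagonal).

-- ===== PORT A =====
def rainhaComMaisAtaques (r : List Int) : Int :=
  let na : List Int := (PySem.List.pyRange 0 (PySem.List.len r) 1).map (fun _ => (0 : Int))
  let na := (PySem.List.pyRange 0 (PySem.List.len r - 1) 1).foldl (fun na i =>
    (PySem.List.pyRange (i + 1) (PySem.List.len r) 1).foldl (fun na j =>
      if PySem.List.pyGetD r i 0 = PySem.List.pyGetD r j 0 ∨
         (i - j).natAbs = (PySem.List.pyGetD r i 0 - PySem.List.pyGetD r j 0).natAbs then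
        let na := PySem.List.pySetD na i (PySem.List.pyGetD na i 0 + 1)
        PySem.List.pySetD na j (PySem.List.pyGetD na j 0 + 1)
      else na) na) na
  match PySem.List.max? na (fun y => y) with   -- max(na): none = ValueError, excluded by Pre_
  | none => 0
  | some x => (((PySem.List.index? na x).getD 0 : Nat) : Int)

-- ===== PORT B =====
def rainhaComMaisAtaques_alt (r : List Int) : Int :=
  let dicts := (PySem.List.enumerate r).foldl
    (fun (t : PySem.Dict Int Int × PySem.Dict Int Int × PySem.Dict Int Int) p =>
      (t.1.insert p.2 (t.1.getD p.2 0 + 1),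
       t.2.1.insert (p.2 - p.1) (t.2.1.getD (p.2 - p.1) 0 + 1),
       t.2.2.insert (p.2 + p.1) (t.2.2.getD (p.2 + p.1) 0 + 1)))
    (PySem.Dict.empty, PySem.Dict.empty, PySem.Dict.empty)
  let na := (PySem.List.enumerate r).map (fun p =>
    dicts.1.getD p.2 0 + dicts.2.1.getD (p.2 - p.1) 0 + dicts.2.2.getD (p.2 + p.1) 0 - 3)
  match PySem.List.max? na (fun y => y) with   -- max(na): none = ValueError, excluded by Pre_
  | none => 0
  | some x => (((PySem.List.index? na x).getD 0 : Nat) : Int)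

-- ===== PRECONDITION & SPEC =====
-- Pre_ excludes only the empty list, on which both Pythons raise ValueError (max() of an empty sequence).
def Pre_rainhaComMaisAtaques (r : List Int) : Prop := r ≠ []
instance (r : List Int) : Decidable (Pre_rainhaComMaisAtaques r) := by unfold Pre_rainhaComMaisAtaques; infer_instance
def pvWitness_rainhaComMaisAtaques : List Int := [0, 2, 1]

def Spec_rainhaComMaisAtaques (r : List Int) (out : Int) : Prop := out = rainhaComMaisAtaques_alt r
instance (r : List Int) (out : Int) : Decidable (Spec_rainhaComMaisAtaques r out) := by unfold Spec_rainhaComMaisAtaques; infer_instance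

-- ===== CLAIM (what is proved, stated in full; the proofs are below) =====
def Claim_equal_rainhaComMaisAtaques : Prop := ∀ (r : List Int), Dom_rainhaComMaisAtaques r → Pre_rainhaComMaisAtaques r → Spec_rainhaComMaisAtaques r (rainhaComMaisAtaques r)

-- ===== LEMMAS AND PROOFS =====

-- the attack predicate between board indices k and j (as A tests it)
def pvAtk (r : List Int) (k j : Nat) : Bool :=
  decide (r.getD k 0 = r.getD j 0 ∨ ((k : Int) - (j : Int)).natAbs = (r.getD k 0 - r.getD j 0).natAbs)

-- one step of A's inner loop, on Nat indices
def pvBump (r : List Int) (na : List Int) (p : Nat × Nat) : List Int :=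
  if r.getD p.1 0 = r.getD p.2 0 ∨ ((p.1 : Int) - (p.2 : Int)).natAbs = (r.getD p.1 0 - r.getD p.2 0).natAbs then
    let na1 := na.set p.1 (na.getD p.1 0 + 1)
    na1.set p.2 (na1.getD p.2 0 + 1)
  else na

-- all ordered pairs (i, j) with i < j < n, in A's traversal order (outer i, inner j)
def pvPairs (n : Nat) : List (Nat × Nat) :=
  (List.range n).flatMap (fun i => (List.range (n - (i + 1))).map (fun t => (i, i + 1 + t)))

-- number of attacks on queen k (the value A stores in na[k])
def pvNavc (r : List Int) (k : Nat) : Nat :=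
  (List.range r.length).countP (fun j => decide (j ≠ k) && pvAtk r k j)

def pvNaL (r : List Int) : List Int := (List.range r.length).map (fun k => (pvNavc r k : Int))

lemma pvAtk_comm (r : List Int) (i j : Nat) : pvAtk r i j = pvAtk r j i := by
  simp only [pvAtk, decide_eq_decide]
  constructor <;> rintro (h | h)
  · exact Or.inl h.symm
  · exact Or.inr (by omega)
  · exact Or.inl h.symm
  · exact Or.inr (by omega)

lemma pvAtk_self (r : List Int) (k : Nat) : pvAtk r k k = true := by
  simp [pvAtk]

lemma pvBump_length (r na : List Int) (p : Nat × Nat) : (pvBump r na p).length = na.length := by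
  unfold pvBump; split <;> simp

lemma getD_pvBump (r na : List Int) (p : Nat × Nat) (hne : p.1 ≠ p.2)
    (h1 : p.1 < na.length) (h2 : p.2 < na.length) (k : Nat) :
    (pvBump r na p).getD k 0 =
      na.getD k 0 + (if pvAtk r p.1 p.2 && (decide (k = p.1) || decide (k = p.2)) then 1 else 0) := by
  by_cases hc : r.getD p.1 0 = r.getD p.2 0 ∨ ((p.1 : Int) - (p.2 : Int)).natAbs = (r.getD p.1 0 - r.getD p.2 0).natAbs
  · simp only [pvBump, pvAtk, hc, decide_true, Bool.true_and]
    by_cases hk2 : k = p.2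
    · subst hk2
      simp [List.getD_eq_getElem?_getD, h1, h2, hne, Ne.symm hne]
    · by_cases hk1 : k = p.1
      · subst hk1
        simp [List.getD_eq_getElem?_getD, h1, h2, hne, Ne.symm hk2]
      · have hk1' : p.1 ≠ k := fun h => hk1 h.symm
        have hk2' : p.2 ≠ k := fun h => hk2 h.symm
        simp [List.getD_eq_getElem?_getD, List.getElem?_set, hk1, hk2, hk1', hk2']
  · have hfa : pvAtk r p.1 p.2 = false := decide_eq_false hc
    simp only [pvBump]
    rw [if_neg hc]
    simp [hfa]

lemma foldl_pvBump_length (r : List Int) :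
    ∀ (P : List (Nat × Nat)) (na : List Int), (P.foldl (pvBump r) na).length = na.length := by
  intro P
  induction P with
  | nil => intro na; rfl
  | cons p P ih => intro na; simp [List.foldl_cons, ih, pvBump_length]

lemma foldl_pvBump_getD (r : List Int) :
    ∀ (P : List (Nat × Nat)) (na : List Int),
      (∀ p ∈ P, p.1 ≠ p.2 ∧ p.1 < na.length ∧ p.2 < na.length) → ∀ k : Nat,
      (P.foldl (pvBump r) na).getD k 0 =
        na.getD k 0 + (P.countP (fun p => pvAtk r p.1 p.2 && (decide (k = p.1) || decide (k = p.2))) : Int) := by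
  intro P
  induction P with
  | nil => intro na _ k; simp
  | cons p P ih =>
      intro na hb k
      obtain ⟨hne, h1, h2⟩ := hb p (by simp)
      have hb' : ∀ q ∈ P, q.1 ≠ q.2 ∧ q.1 < (pvBump r na p).length ∧ q.2 < (pvBump r na p).length := by
        intro q hq
        have := hb q (by simp [hq])
        simpa [pvBump_length] using this
      simp only [List.foldl_cons]
      rw [ih _ hb' k, getD_pvBump r na p hne h1 h2 k, List.countP_cons]
      split <;> push_cast <;> ring

lemma mem_pvPairs (n : Nat) (p : Nat × Nat) : p ∈ pvPairs n ↔ p.1 < p.2 ∧ p.2 < n := by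
  simp only [pvPairs, List.mem_flatMap, List.mem_map, List.mem_range]
  constructor
  · rintro ⟨i, hi, t, ht, rfl⟩; simp; omega
  · rintro ⟨h1, h2⟩
    exact ⟨p.1, by omega, p.2 - p.1 - 1, by omega, by cases p with | mk a b => simp; omega⟩

-- small countP helpers
lemma pv_countP_flatMap {α : Type} (l : List α) (f : α → List (Nat × Nat)) (p : Nat × Nat → Bool) :
    (l.flatMap f).countP p = (l.map (fun i => (f i).countP p)).sum := by
  induction l with
  | nil => rfl
  | cons a t ih => simp [List.flatMap_cons, List.countP_append, ih]

lemma pv_sum_split (l : List Nat) (f g : Nat → Nat) :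
    (l.map (fun i => f i + g i)).sum = (l.map f).sum + (l.map g).sum := by
  induction l with
  | nil => rfl
  | cons a t ih => simp [ih]; omega

lemma pv_sum_ite_countP (l : List Nat) (q : Nat → Bool) :
    (l.map (fun i => if q i then 1 else 0)).sum = l.countP q := by
  induction l with
  | nil => rfl
  | cons a t ih =>
      by_cases h : q a
      · simp [h, ih]
        omega
      · simp [h, ih]

lemma pv_countP_single (n k : Nat) (c : Nat → Bool) (hk : k < n) :
    (List.range n).countP (fun i => c i && decide (k = i)) = if c k then 1 else 0 := by
  induction n with
  | zero => omega
  | succ n ih =>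
      rw [List.range_succ, List.countP_append]
      by_cases hkn : k = n
      · subst hkn
        have h0 : (List.range k).countP (fun i => c i && decide (k = i)) = 0 := by
          apply List.countP_eq_zero.mpr
          intro i hi
          rw [List.mem_range] at hi
          simp [show k ≠ i by omega]
        rw [h0]
        by_cases hc : c k <;> simp [hc]
      · have hk' : k < n := by omega
        rw [ih hk']
        have h1 : List.countP (fun i => c i && decide (k = i)) [n] = 0 := by
          simp [hkn]
        rw [h1, Nat.add_zero]

lemma pv_countP_split (n k : Nat) (q : Nat → Bool) (hk : k < n) :
    (List.range n).countP q = (if q k then 1 else 0) + (List.range n).countP (fun i => decide (i ≠ k) && q i) := by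
  induction n with
  | zero => omega
  | succ n ih =>
      rw [List.range_succ, List.countP_append, List.countP_append]
      by_cases hkn : k = n
      · subst hkn
        have h1 : (List.range k).countP q = (List.range k).countP (fun i => decide (i ≠ k) && q i) := by
          apply List.countP_congr
          intro i hi
          rw [List.mem_range] at hi
          simp [show i ≠ k by omega]
        have h2 : List.countP q [k] = if q k then 1 else 0 := by simp
        have h3 : List.countP (fun i => decide (i ≠ k) && q i) [k] = 0 := by simp
        rw [h1, h2, h3]
        omega
      · have hk' : k < n := by omega
        rw [ih hk']
        have h2 : List.countP (fun i => decide (i ≠ k) && q i) [n] = List.countP q [n] := by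
          simp [Ne.symm hkn]
        rw [h2]
        omega

-- the pairs-count recurrence
lemma pvPairs_succ_countP (n : Nat) (p : Nat × Nat → Bool) :
    (pvPairs (n + 1)).countP p = (pvPairs n).countP p + (List.range n).countP (fun i => p (i, n)) := by
  unfold pvPairs
  rw [List.range_succ, List.flatMap_append, List.countP_append]
  simp only [List.flatMap_cons, List.flatMap_nil, Nat.sub_self, List.range_zero, List.map_nil,
    List.nil_append, List.countP_nil, add_zero]
  rw [pv_countP_flatMap, pv_countP_flatMap]
  have hmap : (List.range n).map (fun i => ((List.range (n + 1 - (i + 1))).map (fun t => (i, i + 1 + t))).countP p)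
      = (List.range n).map (fun i => ((List.range (n - (i + 1))).map (fun t => (i, i + 1 + t))).countP p
          + (if p (i, n) then 1 else 0)) := by
    apply List.map_congr_left
    intro i hi
    rw [List.mem_range] at hi
    have h1 : n + 1 - (i + 1) = (n - (i + 1)) + 1 := by omega
    rw [h1, List.range_succ, List.map_append, List.countP_append]
    have h2 : i + 1 + (n - (i + 1)) = n := by omega
    simp [h2]
  rw [hmap, pv_sum_split, pv_sum_ite_countP]

lemma pvPairs_countP_touch (r : List Int) (n : Nat) :
    ∀ k, k < n →
      (pvPairs n).countP (fun p => pvAtk r p.1 p.2 && (decide (k = p.1) || decide (k = p.2)))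
        = (List.range n).countP (fun j => decide (j ≠ k) && pvAtk r k j) := by
  induction n with
  | zero => intro k hk; omega
  | succ n ih =>
      intro k hk
      rw [pvPairs_succ_countP, List.range_succ, List.countP_append]
      by_cases hkn : k = n
      · subst hkn
        have hz : (pvPairs k).countP (fun p => pvAtk r p.1 p.2 && (decide (k = p.1) || decide (k = p.2))) = 0 := by
          apply List.countP_eq_zero.mpr
          intro p hp
          have := (mem_pvPairs k p).mp hp
          simp only [Bool.and_eq_true, Bool.or_eq_true, decide_eq_true_eq]
          rintro ⟨-, (h | h)⟩ <;> omega
        rw [hz, Nat.zero_add]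
        have h1 : (List.range k).countP (fun i => pvAtk r i k && (decide (k = i) || decide (k = k)))
            = (List.range k).countP (fun i => pvAtk r i k) := by
          apply List.countP_congr
          intro i _
          simp
        have h3 : List.countP (fun j => decide (j ≠ k) && pvAtk r k j) [k] = 0 := by simp
        have h2 : (List.range k).countP (fun j => decide (j ≠ k) && pvAtk r k j)
            = (List.range k).countP (fun i => pvAtk r i k) := by
          apply List.countP_congr
          intro i hi
          rw [List.mem_range] at hi
          simp [pvAtk_comm r i k, show i ≠ k by omega]
        rw [h1, h2, h3, Nat.add_zero]
      · have hk' : k < n := by omega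
        rw [ih k hk']
        have h1 : (List.range n).countP (fun i => pvAtk r i n && (decide (k = i) || decide (k = n)))
            = (List.range n).countP (fun i => pvAtk r i n && decide (k = i)) := by
          apply List.countP_congr
          intro i _
          simp [hkn]
        rw [h1, pv_countP_single n k (fun i => pvAtk r i n) hk']
        have h2 : List.countP (fun j => decide (j ≠ k) && pvAtk r k j) [n]
            = (if pvAtk r k n then 1 else 0) := by
          simp [List.countP_cons, Ne.symm hkn]
        rw [h2]

-- ===== A-side: the nested loop computes pvNaL =====

lemma pvPairs_eq_pairsA (n : Nat) :
    pvPairs n = (List.range (n - 1)).flatMap (fun i => (List.range (n - (i + 1))).map (fun t => (i, i + 1 + t))) := by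
  cases n with
  | zero => rfl
  | succ m =>
      unfold pvPairs
      rw [List.range_succ, List.flatMap_append]
      simp

lemma pv_replicate_getD (n k : Nat) : (List.replicate n (0 : Int)).getD k 0 = 0 := by
  rw [List.getD_eq_getElem?_getD, List.getElem?_replicate]
  split <;> rfl

lemma portA_na (r : List Int) :
    ((PySem.List.pyRange 0 (PySem.List.len r - 1) 1).foldl (fun na i =>
      (PySem.List.pyRange (i + 1) (PySem.List.len r) 1).foldl (fun na j =>
        if PySem.List.pyGetD r i 0 = PySem.List.pyGetD r j 0 ∨
           (i - j).natAbs = (PySem.List.pyGetD r i 0 - PySem.List.pyGetD r j 0).natAbs then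
          let na := PySem.List.pySetD na i (PySem.List.pyGetD na i 0 + 1)
          PySem.List.pySetD na j (PySem.List.pyGetD na j 0 + 1)
        else na) na) ((PySem.List.pyRange 0 (PySem.List.len r) 1).map (fun _ => (0 : Int))))
    = pvNaL r := by
  have hinit : (PySem.List.pyRange 0 (PySem.List.len r) 1).map (fun _ => (0 : Int))
      = List.replicate r.length 0 := by
    rw [PySem.List.len_eq, PySem.List.pyRange_zero_natCast]
    apply List.ext_getElem <;> simp
  rw [hinit, PySem.List.len_eq]
  have houter : PySem.List.pyRange 0 ((r.length : Int) - 1) 1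
      = (List.range (r.length - 1)).map (fun (k : Nat) => (k : Int)) := by
    rw [PySem.List.pyRange_one]
    have h : (((r.length : Int) - 1) - 0).toNat = r.length - 1 := by omega
    rw [h]
    apply List.map_congr_left
    intro a _
    omega
  rw [houter, List.foldl_map]
  have hflat : (List.range (r.length - 1)).foldl (fun (na : List Int) (iN : Nat) =>
      (PySem.List.pyRange ((iN : Int) + 1) (r.length : Int) 1).foldl (fun na j =>
        if PySem.List.pyGetD r (iN : Int) 0 = PySem.List.pyGetD r j 0 ∨
           ((iN : Int) - j).natAbs = (PySem.List.pyGetD r (iN : Int) 0 - PySem.List.pyGetD r j 0).natAbs then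
          let na := PySem.List.pySetD na (iN : Int) (PySem.List.pyGetD na (iN : Int) 0 + 1)
          PySem.List.pySetD na j (PySem.List.pyGetD na j 0 + 1)
        else na) na) (List.replicate r.length 0)
      = (pvPairs r.length).foldl (pvBump r) (List.replicate r.length 0) := by
    rw [pvPairs_eq_pairsA, List.foldl_flatMap]
    apply PySem.List.foldl_congr_mem
    intro na iN hiN
    rw [List.mem_range] at hiN
    have hinner : PySem.List.pyRange ((iN : Int) + 1) (r.length : Int) 1
        = (List.range (r.length - (iN + 1))).map (fun (t : Nat) => ((iN : Int) + 1 + (t : Int))) := by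
      rw [PySem.List.pyRange_one]
      have h : ((r.length : Int) - ((iN : Int) + 1)).toNat = r.length - (iN + 1) := by omega
      rw [h]
    rw [hinner, List.foldl_map, List.foldl_map]
    apply PySem.List.foldl_congr_mem
    intro na' tN _
    have hcast : ((iN : Int) + 1 + (tN : Int)) = ((iN + 1 + tN : Nat) : Int) := by push_cast; ring
    rw [hcast]
    simp only [PySem.List.pyGetD_natCast, PySem.List.pySetD_natCast, pvBump]
  rw [hflat]
  have hlen : ((pvPairs r.length).foldl (pvBump r) (List.replicate r.length 0)).length = r.length := by
    rw [foldl_pvBump_length, List.length_replicate]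
  apply List.ext_getElem
  · rw [hlen]
    simp [pvNaL]
  · intro k h1 h2
    rw [hlen] at h1
    have hg := foldl_pvBump_getD r (pvPairs r.length) (List.replicate r.length 0)
      (by
        intro p hp
        have := (mem_pvPairs r.length p).mp hp
        simp only [List.length_replicate]
        omega) k
    rw [pv_replicate_getD, pvPairs_countP_touch r r.length k h1] at hg
    have hL : ((pvPairs r.length).foldl (pvBump r) (List.replicate r.length 0))[k]
        = ((pvPairs r.length).foldl (pvBump r) (List.replicate r.length 0)).getD k 0 :=
      (List.getD_eq_getElem _ _ (by omega)).symm
    rw [hL, hg]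
    simp [pvNaL, pvNavc]

-- ===== B-side: the dict counters compute pvNaL too =====

lemma pv_dicts_split (l : List (Int × Int)) (a b c : PySem.Dict Int Int) :
    l.foldl (fun (t : PySem.Dict Int Int × PySem.Dict Int Int × PySem.Dict Int Int) p =>
      (t.1.insert p.2 (t.1.getD p.2 0 + 1),
       t.2.1.insert (p.2 - p.1) (t.2.1.getD (p.2 - p.1) 0 + 1),
       t.2.2.insert (p.2 + p.1) (t.2.2.getD (p.2 + p.1) 0 + 1))) (a, b, c)
    = (l.foldl (fun d p => d.insert p.2 (d.getD p.2 0 + 1)) a,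
       l.foldl (fun d p => d.insert (p.2 - p.1) (d.getD (p.2 - p.1) 0 + 1)) b,
       l.foldl (fun d p => d.insert (p.2 + p.1) (d.getD (p.2 + p.1) 0 + 1)) c) := by
  induction l generalizing a b c with
  | nil => rfl
  | cons x t ih => simp [List.foldl_cons, ih]

lemma pv_enumerate_eq (r : List Int) :
    PySem.List.enumerate r = (List.range r.length).map (fun (k : Nat) => ((k : Int), r.getD k 0)) := by
  rw [PySem.List.enumerate_eq_map_pyRange r 0, PySem.List.len_eq, PySem.List.pyRange_zero_natCast,
    List.map_map]
  apply List.map_congr_left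
  intro a _
  simp

-- pointwise: row + diag + anti indicator sum vs the attack indicator
lemma pv_pointwise (r : List Int) (k j : Nat) (hne : j ≠ k) :
    ((if r.getD j 0 == r.getD k 0 then 1 else 0) : Nat)
      + (if r.getD j 0 - (j : Int) == r.getD k 0 - (k : Int) then 1 else 0)
      + (if r.getD j 0 + (j : Int) == r.getD k 0 + (k : Int) then 1 else 0)
      = if pvAtk r k j then 1 else 0 := by
  have hjk : (j : Int) ≠ (k : Int) := by exact_mod_cast hne
  simp only [beq_iff_eq, pvAtk, decide_eq_true_eq]
  split_ifs <;> omega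

lemma pv_countP_add3 (l : List Nat) (p1 p2 p3 q : Nat → Bool) (k : Nat)
    (h : ∀ x ∈ l, ((if p1 x then 1 else 0) : Nat) + (if p2 x then 1 else 0) + (if p3 x then 1 else 0)
        = (if q x then 1 else 0) + 2 * (if x = k then 1 else 0)) :
    l.countP p1 + l.countP p2 + l.countP p3 = l.countP q + 2 * l.count k := by
  induction l with
  | nil => simp
  | cons a t ih =>
      have ha := h a (by simp)
      have ht := ih (fun x hx => h x (by simp [hx]))
      simp only [List.countP_cons, List.count_cons]
      by_cases ek : a = k
      · subst ek
        by_cases e1 : p1 a <;> by_cases e2 : p2 a <;> by_cases e3 : p3 a <;> by_cases eq : q a <;>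
          simp only [e1, e2, e3, eq, if_true, beq_self_eq_true] at ha ⊢ <;>
            omega
      · have hke : ¬ (k = a) := fun hh => ek hh.symm
        by_cases e1 : p1 a <;> by_cases e2 : p2 a <;> by_cases e3 : p3 a <;> by_cases eq : q a <;>
          simp only [e1, e2, e3, eq, ek, if_true, if_false, beq_iff_eq] at ha ⊢ <;>
            omega

lemma pv_keyed_getD (l : List (Int × Int)) (key : Int × Int → Int) (v : Int) :
    ((l.foldl (fun (d : PySem.Dict Int Int) p => d.insert (key p) (d.getD (key p) 0 + 1)) PySem.Dict.empty).getD v 0)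
      = ((l.map key).count v : Int) := by
  have h1 : (l.map key).foldl (fun (d : PySem.Dict Int Int) x => d.insert x (d.getD x 0 + 1)) PySem.Dict.empty
      = l.foldl (fun (d : PySem.Dict Int Int) p => d.insert (key p) (d.getD (key p) 0 + 1)) PySem.Dict.empty := by
    rw [List.foldl_map]
  rw [← h1, PySem.Dict.getD_foldl_insert_add_one]
  simp

lemma pvNaL_getD (r : List Int) (k : Nat) (hk : k < r.length) :
    (pvNaL r).getD k 0 = (pvNavc r k : Int) := by
  have h : k < (pvNaL r).length := by simp [pvNaL, hk]
  rw [List.getD_eq_getElem _ _ h]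
  simp [pvNaL]

lemma pv_aval (r : List Int) (k : Nat) (hk : k < r.length) :
    ((((List.range r.length).map (fun (j : Nat) => ((j : Int), r.getD j 0))).map (fun p => p.2)).count (r.getD k 0) : Int)
      + ((((List.range r.length).map (fun (j : Nat) => ((j : Int), r.getD j 0))).map (fun p => p.2 - p.1)).count (r.getD k 0 - (k : Int)) : Int)
      + ((((List.range r.length).map (fun (j : Nat) => ((j : Int), r.getD j 0))).map (fun p => p.2 + p.1)).count (r.getD k 0 + (k : Int)) : Int)
      - 3 = (pvNaL r).getD k 0 := by
  have hm1 : ((List.range r.length).map (fun (j : Nat) => ((j : Int), r.getD j 0))).map (fun p => p.2)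
      = (List.range r.length).map (fun j => r.getD j 0) := by
    rw [List.map_map]
    rfl
  have hm2 : ((List.range r.length).map (fun (j : Nat) => ((j : Int), r.getD j 0))).map (fun p => p.2 - p.1)
      = (List.range r.length).map (fun j => r.getD j 0 - (j : Int)) := by
    rw [List.map_map]
    rfl
  have hm3 : ((List.range r.length).map (fun (j : Nat) => ((j : Int), r.getD j 0))).map (fun p => p.2 + p.1)
      = (List.range r.length).map (fun j => r.getD j 0 + (j : Int)) := by
    rw [List.map_map]
    rfl
  rw [hm1, hm2, hm3, pvNaL_getD r k hk]
  have hc1 : ((List.range r.length).map (fun j => r.getD j 0)).count (r.getD k 0)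
      = (List.range r.length).countP (fun j => r.getD j 0 == r.getD k 0) := by
    rw [List.count_eq_countP, List.countP_map]
    rfl
  have hc2 : ((List.range r.length).map (fun j => r.getD j 0 - (j : Int))).count (r.getD k 0 - (k : Int))
      = (List.range r.length).countP (fun j => r.getD j 0 - (j : Int) == r.getD k 0 - (k : Int)) := by
    rw [List.count_eq_countP, List.countP_map]
    rfl
  have hc3 : ((List.range r.length).map (fun j => r.getD j 0 + (j : Int))).count (r.getD k 0 + (k : Int))
      = (List.range r.length).countP (fun j => r.getD j 0 + (j : Int) == r.getD k 0 + (k : Int)) := by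
    rw [List.count_eq_countP, List.countP_map]
    rfl
  rw [hc1, hc2, hc3]
  have hadd := pv_countP_add3 (List.range r.length)
      (fun j => r.getD j 0 == r.getD k 0)
      (fun j => r.getD j 0 - (j : Int) == r.getD k 0 - (k : Int))
      (fun j => r.getD j 0 + (j : Int) == r.getD k 0 + (k : Int))
      (fun j => pvAtk r k j) k
      (by
        intro x _
        by_cases hxk : x = k
        · subst hxk
          simp [pvAtk_self]
        · rw [if_neg hxk, Nat.mul_zero, Nat.add_zero]
          exact pv_pointwise r k x hxk)
  have hcnt : (List.range r.length).count k = 1 :=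
    List.count_eq_one_of_mem List.nodup_range (by simp [hk])
  rw [hcnt] at hadd
  have hsplit := pv_countP_split r.length k (fun j => pvAtk r k j) hk
  simp only [pvAtk_self, if_true] at hsplit
  unfold pvNavc
  omega

def pv_dictsB (r : List Int) : PySem.Dict Int Int × PySem.Dict Int Int × PySem.Dict Int Int :=
  (PySem.List.enumerate r).foldl
    (fun (t : PySem.Dict Int Int × PySem.Dict Int Int × PySem.Dict Int Int) p =>
      (t.1.insert p.2 (t.1.getD p.2 0 + 1),
       t.2.1.insert (p.2 - p.1) (t.2.1.getD (p.2 - p.1) 0 + 1),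
       t.2.2.insert (p.2 + p.1) (t.2.2.getD (p.2 + p.1) 0 + 1)))
    (PySem.Dict.empty, PySem.Dict.empty, PySem.Dict.empty)

-- B's na list equals pvNaL
lemma portB_na (r : List Int) :
    (PySem.List.enumerate r).map (fun p =>
      (pv_dictsB r).1.getD p.2 0 + (pv_dictsB r).2.1.getD (p.2 - p.1) 0 + (pv_dictsB r).2.2.getD (p.2 + p.1) 0 - 3)
    = pvNaL r := by
  unfold pv_dictsB
  rw [pv_dicts_split]
  simp only [pv_keyed_getD]
  rw [pv_enumerate_eq, List.map_map]
  have hlen : pvNaL r = (List.range r.length).map (fun k => (pvNaL r).getD k 0) := by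
    apply List.ext_getElem
    · simp [pvNaL]
    · intro k h1 h2
      simp only [List.getElem_map, List.getElem_range]
      rw [List.getD_eq_getElem _ _ h1]
  rw [hlen]
  apply List.map_congr_left
  intro k hk
  rw [List.mem_range] at hk
  simp only [Function.comp]
  exact pv_aval r k hk

-- ===== main equivalence =====

theorem pv_main (r : List Int) (_ : r ≠ []) :
    rainhaComMaisAtaques r = rainhaComMaisAtaques_alt r := by
  simp only [rainhaComMaisAtaques, rainhaComMaisAtaques_alt]
  rw [portA_na r]
  have hB := portB_na r
  unfold pv_dictsB at hB
  rw [hB]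

-- ===== VERDICT (by name: the statement is the Claim_ definition above) =====
theorem rainhaComMaisAtaques_spec : Claim_equal_rainhaComMaisAtaques := by
  intro r _ hpre
  exact pv_main r hpre
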